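-- pv_equiv track=rewrite | github.com/benjaminfjones/advent-of-code-2018 | d6.py | compute_safe_area
-- ===== SOURCE A (Python) =====
-- from typing import Dict, List, Optional, Set, Tuple
--
-- Point = Tuple[int, int]
--
-- def l1(p1: Point, p2: Point) -> int:
--     """
--     L_1 distance on the 2d integer lattice
--     """
--     return abs(p2[0]-p1[0]) + abs(p2[1]-p1[1])
--
-- def compute_safe_area(xs: List[Point], region: Set[Point]
--                       ) -> int:
--     """
--     Count the number of points in 'region' that are within 10000 summed
--     L_1 distance over all the given points.
--     """
--     count: int = 0
--     for p in region:
--         tdist = sum([l1(p, x) for x in xs])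
--         if tdist < 10000:
--             count = count + 1
--     return count
-- ===== SOURCE B (Python) =====
-- def compute_safe_area(xs, region):
--     # Sort each coordinate once, precompute prefix sums; then the summed L1
--     # distance of a point is two O(log n) binary-search lookups.
--     sx = sorted([p[0] for p in xs])
--     sy = sorted([p[1] for p in xs])
--     px = _prefix(sx)
--     py = _prefix(sy)
--     count = 0
--     for p in region:
--         if _abs_dist(sx, px, p[0]) + _abs_dist(sy, py, p[1]) < 10000:
--             count += 1
--     return count
--
-- def _prefix(s):
--     pre = [0]
--     acc = 0
--     for v in s:
--         acc += v
--         pre.append(acc)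
--     return pre
--
-- def _bisect_left(s, v):
--     lo, hi = 0, len(s)
--     while lo < hi:
--         mid = (lo + hi) // 2
--         if s[mid] < v:
--             lo = mid + 1
--         else:
--             hi = mid
--     return lo
--
-- def _abs_dist(s, pre, v):
--     # sum(|v - u| for u in s), given s sorted and pre its prefix sums
--     k = _bisect_left(s, v)
--     n = len(s)
--     return (k * v - pre[k]) + ((pre[n] - pre[k]) - (n - k) * v)
-- ===== Notes on version B (the rewrite author's own statement) =====
-- stated objective: faster
-- what changed: Instead of summing L1 distances over all xs for every region point, B sorts the x- and y-coordinates once, builds prefix sums, and computes each point's summed distance by binary search in the sorted coordinate arrays.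
import Mathlib
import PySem

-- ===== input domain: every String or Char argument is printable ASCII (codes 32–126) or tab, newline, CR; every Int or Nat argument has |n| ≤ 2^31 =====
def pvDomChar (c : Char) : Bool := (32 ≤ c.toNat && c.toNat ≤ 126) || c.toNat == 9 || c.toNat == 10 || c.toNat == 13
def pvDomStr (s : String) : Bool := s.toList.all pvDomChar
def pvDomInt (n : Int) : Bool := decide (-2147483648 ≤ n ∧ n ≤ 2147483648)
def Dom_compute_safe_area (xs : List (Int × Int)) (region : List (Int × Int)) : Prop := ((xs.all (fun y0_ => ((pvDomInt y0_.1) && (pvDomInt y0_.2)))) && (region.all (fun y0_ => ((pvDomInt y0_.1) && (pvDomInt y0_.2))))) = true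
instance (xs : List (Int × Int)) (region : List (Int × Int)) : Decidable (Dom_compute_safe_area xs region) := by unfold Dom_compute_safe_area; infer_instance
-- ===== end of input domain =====

-- B replaces A's per-region-point scan of xs by sorted coordinate lists with prefix
-- sums and a binary search per region point: asymptotically faster, same result.

-- ===== PORT A =====
def l1 (p1 : Int × Int) (p2 : Int × Int) : Int :=
  |p2.1 - p1.1| + |p2.2 - p1.2|

def compute_safe_area (xs : List (Int × Int)) (region : List (Int × Int)) : Int :=
  region.foldl (fun count p =>
    let tdist := (xs.map (fun x => l1 p x)).sum
    if tdist < 10000 then count + 1 else count) 0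

-- ===== PORT B =====
-- Source B's _prefix: pre = [0]; acc = 0; for v in s: acc += v; pre.append(acc)
def pvPrefix (s : List Int) : List Int :=
  (s.foldl (fun st v => (st.1 ++ [st.2 + v], st.2 + v)) (([0] : List Int), (0 : Int))).1

-- Source B's _abs_dist; its hand-written _bisect_left is CPython's bisect_left loop,
-- ported as PySem.List.bisectLeft (the same lo/hi binary search).
def pvAbsDist (s : List Int) (pre : List Int) (v : Int) : Int :=
  let k := PySem.List.bisectLeft s v
  let n := s.length
  ((k : Int) * v - PySem.List.pyGetD pre (k : Int) 0)
    + ((PySem.List.pyGetD pre (n : Int) 0 - PySem.List.pyGetD pre (k : Int) 0)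
        - ((n : Int) - (k : Int)) * v)

def compute_safe_area_alt (xs : List (Int × Int)) (region : List (Int × Int)) : Int :=
  let sx := PySem.List.sorted (xs.map (fun p => p.1)) (fun x => x) false
  let sy := PySem.List.sorted (xs.map (fun p => p.2)) (fun x => x) false
  let px := pvPrefix sx
  let py := pvPrefix sy
  region.foldl (fun count p =>
    if pvAbsDist sx px p.1 + pvAbsDist sy py p.2 < 10000 then count + 1 else count) 0

-- ===== PRECONDITION & SPEC =====
def Spec_compute_safe_area (xs : List (Int × Int)) (region : List (Int × Int)) (out : Int) : Prop := out = compute_safe_area_alt xs region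
instance (xs : List (Int × Int)) (region : List (Int × Int)) (out : Int) : Decidable (Spec_compute_safe_area xs region out) := by unfold Spec_compute_safe_area; infer_instance

-- ===== CLAIM (what is proved, stated in full; the proofs are below) =====
def Claim_equal_compute_safe_area : Prop := ∀ (xs : List (Int × Int)) (region : List (Int × Int)), Dom_compute_safe_area xs region → Spec_compute_safe_area xs region (compute_safe_area xs region)

-- ===== LEMMAS AND PROOFS =====

-- the prefix loop produces the list of partial sums
theorem pvPrefix_foldl (s : List Int) (pre : List Int) (a : Int) :
    s.foldl (fun st v => (st.1 ++ [st.2 + v], st.2 + v)) (pre, a)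
      = (pre ++ (List.range s.length).map (fun i => a + ((s.take (i+1)).sum)),
         a + s.sum) := by
  induction s generalizing pre a with
  | nil => simp
  | cons v t ih =>
      simp only [List.foldl_cons, ih, List.length_cons, List.range_succ_eq_map,
        List.map_cons, List.map_map]
      simp only [Prod.mk.injEq]
      constructor
      · simp [List.append_assoc, Function.comp_def, add_assoc]
      · simp [add_assoc]

theorem pvPrefix_eq (s : List Int) :
    pvPrefix s = (List.range (s.length + 1)).map (fun k => (s.take k).sum) := by
  unfold pvPrefix
  rw [pvPrefix_foldl]
  simp [List.range_succ_eq_map, List.map_map, Function.comp_def]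

theorem pvPrefix_getD (s : List Int) (k : Nat) (hk : k ≤ s.length) :
    (pvPrefix s).getD k 0 = (s.take k).sum := by
  rw [pvPrefix_eq, PySem.List.getD_map_range _ _ _ _ (by omega)]

-- sums of |v - u| over lists entirely below / at-or-above v
theorem sum_abs_lt (t : List Int) (v : Int) (h : ∀ u ∈ t, u < v) :
    (t.map (fun u => |v - u|)).sum = (t.length : Int) * v - t.sum := by
  induction t with
  | nil => simp
  | cons u t ih =>
      have hu : u < v := h u (by simp)
      have := ih (fun w hw => h w (by simp [hw]))
      simp only [List.map_cons, List.sum_cons, this, List.length_cons, List.sum_cons]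
      rw [abs_of_pos (by omega)]
      push_cast; ring

theorem sum_abs_ge (t : List Int) (v : Int) (h : ∀ u ∈ t, v ≤ u) :
    (t.map (fun u => |v - u|)).sum = t.sum - (t.length : Int) * v := by
  induction t with
  | nil => simp
  | cons u t ih =>
      have hu : v ≤ u := h u (by simp)
      have := ih (fun w hw => h w (by simp [hw]))
      simp only [List.map_cons, List.sum_cons, this, List.length_cons, List.sum_cons]
      rw [abs_of_nonpos (by omega)]
      push_cast; ring

-- the binary-search + prefix-sum formula computes the summed absolute distance
theorem pvAbsDist_eq (s : List Int) (v : Int)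
    (hs : s.Pairwise (· ≤ ·)) :
    pvAbsDist s (pvPrefix s) v = (s.map (fun u => |v - u|)).sum := by
  obtain ⟨hkle, hlt, hge⟩ := PySem.List.bisectLeft_spec s v hs
  unfold pvAbsDist
  set k := PySem.List.bisectLeft s v with hkdef
  set n := s.length with hndef
  simp only [PySem.List.pyGetD_natCast]
  rw [pvPrefix_getD s k hkle, pvPrefix_getD s n (le_refl _), List.take_length]
  have hsplit : (s.map (fun u => |v - u|)).sum
      = ((s.take k).map (fun u => |v - u|)).sum + ((s.drop k).map (fun u => |v - u|)).sum := by
    conv_lhs => rw [← List.take_append_drop k s]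
    simp
  have htake : ∀ u ∈ s.take k, u < v := by
    intro u hu
    rw [List.mem_take_iff_getElem] at hu
    obtain ⟨j, hj, hje⟩ := hu
    exact hje ▸ hlt j (by omega) (by omega)
  have hdrop : ∀ u ∈ s.drop k, v ≤ u := by
    intro u hu
    rw [List.mem_drop_iff_getElem] at hu
    obtain ⟨j, hj, hje⟩ := hu
    exact hje ▸ hge (k + j) (by omega) (by omega)
  rw [hsplit, sum_abs_lt _ _ htake, sum_abs_ge _ _ hdrop]
  have hlen_take : (s.take k).length = k := by rw [List.length_take]; omega
  have hlen_drop : (s.drop k).length = n - k := by simp [hndef]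
  have hsum : (s.drop k).sum = s.sum - (s.take k).sum := by
    have h2 : (s.take k).sum + (s.drop k).sum = s.sum := by
      rw [← List.sum_append, List.take_append_drop]
    omega
  rw [hlen_take, hlen_drop, hsum, Nat.cast_sub hkle]

-- per region point, B's distance formula equals A's summed l1 distance
theorem dist_eq (xs : List (Int × Int)) (p : Int × Int) :
    pvAbsDist (PySem.List.sorted (xs.map (fun q => q.1)) (fun x => x) false)
        (pvPrefix (PySem.List.sorted (xs.map (fun q => q.1)) (fun x => x) false)) p.1
      + pvAbsDist (PySem.List.sorted (xs.map (fun q => q.2)) (fun x => x) false)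
        (pvPrefix (PySem.List.sorted (xs.map (fun q => q.2)) (fun x => x) false)) p.2
      = (xs.map (fun x => l1 p x)).sum := by
  have key : ∀ (f : Int × Int → Int) (v : Int),
      pvAbsDist (PySem.List.sorted (xs.map f) (fun x => x) false)
        (pvPrefix (PySem.List.sorted (xs.map f) (fun x => x) false)) v
      = (xs.map (fun x => |f x - v|)).sum := by
    intro f v
    have hpw : (PySem.List.sorted (xs.map f) (fun x => x) false).Pairwise (· ≤ ·) :=
      PySem.List.sorted_pairwise (xs.map f) (fun x => x)
    rw [pvAbsDist_eq _ _ hpw]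
    have hperm : ((PySem.List.sorted (xs.map f) (fun x => x) false).map (fun u => |v - u|)).Perm
        ((xs.map f).map (fun u => |v - u|)) :=
      (PySem.List.sorted_perm (xs.map f) (fun x => x) false).map _
    rw [hperm.sum_eq, List.map_map]
    exact congrArg List.sum (List.map_congr_left (fun x _ => abs_sub_comm v (f x)))
  rw [key (fun q => q.1) p.1, key (fun q => q.2) p.2]
  unfold l1
  rw [← PySem.List.sum_map_add_int]

-- ===== VERDICT (by name: the statement is the Claim_ definition above) =====
theorem compute_safe_area_spec : Claim_equal_compute_safe_area := by
  intro xs region _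
  show compute_safe_area xs region = compute_safe_area_alt xs region
  unfold compute_safe_area compute_safe_area_alt
  exact PySem.List.foldl_congr_mem region
    (fun (count : Int) (p : Int × Int) => if (List.map (fun x => l1 p x) xs).sum < 10000 then count + 1 else count)
    (fun count p =>
      if pvAbsDist (PySem.List.sorted (xs.map (fun q => q.1)) (fun x => x) false)
            (pvPrefix (PySem.List.sorted (xs.map (fun q => q.1)) (fun x => x) false)) p.1
          + pvAbsDist (PySem.List.sorted (xs.map (fun q => q.2)) (fun x => x) false)
            (pvPrefix (PySem.List.sorted (xs.map (fun q => q.2)) (fun x => x) false)) p.2 < 10000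
        then count + 1 else count)
    0 (fun acc p _ => by dsimp only; rw [dist_eq xs p])
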